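-- pv_equiv track=rewrite | github.com/Chaunecy/ReSeg-PCFG | simulator.py | gen_guess_crack
-- ===== SOURCE A (Python) =====
-- def gen_guess_crack(estimations: [int], upper_bound=10 ** 20):
--     estimations.sort()
--     gc_pairs = {}
--     for idx, est in enumerate(estimations):
--         if est < upper_bound:
--             gc_pairs[est] = idx
--         else:
--             break
--     return list(gc_pairs.keys()), list(gc_pairs.values())
-- ===== SOURCE B (Python) =====
-- def gen_guess_crack(estimations, upper_bound=10 ** 20):
--     estimations.sort()
--     vals = sorted(set(e for e in estimations if e < upper_bound))
--     idxs = []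
--     for v in vals:
--         # rightmost insertion point of v in the sorted list (inlined bisect_right)
--         lo, hi = 0, len(estimations)
--         while lo < hi:
--             mid = (lo + hi) // 2
--             if estimations[mid] <= v:
--                 lo = mid + 1
--             else:
--                 hi = mid
--         idxs.append(lo - 1)
--     return vals, idxs
-- ===== Notes on version B (the rewrite author's own statement) =====
-- stated objective: alternative
-- what changed: Replaces the overwrite-dict loop (last index wins per key, break at the bound) by building the sorted distinct values below the bound with set+sorted and recovering each value's last index with an inlined binary search (bisect_right - 1) on the sorted list.
import Mathlib
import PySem

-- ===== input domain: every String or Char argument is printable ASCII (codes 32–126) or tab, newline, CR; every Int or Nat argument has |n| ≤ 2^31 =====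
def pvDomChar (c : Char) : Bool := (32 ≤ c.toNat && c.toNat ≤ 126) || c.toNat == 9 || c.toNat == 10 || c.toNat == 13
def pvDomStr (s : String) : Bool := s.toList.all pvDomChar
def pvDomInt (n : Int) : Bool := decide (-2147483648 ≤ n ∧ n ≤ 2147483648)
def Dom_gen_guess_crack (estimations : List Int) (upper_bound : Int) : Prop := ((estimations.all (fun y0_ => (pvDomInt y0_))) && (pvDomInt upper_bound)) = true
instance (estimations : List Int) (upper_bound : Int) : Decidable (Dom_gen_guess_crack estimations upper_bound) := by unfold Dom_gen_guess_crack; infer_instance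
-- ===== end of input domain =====

-- B replaces A's overwrite-dict loop by a set+sorted dedup plus an inlined binary search per value
-- (an alternative algorithm of the same cost class). Both A and B sort `estimations` in place in
-- Python (the same mutation); the equivalence proved here is about the RETURN value.

-- ===== PORT A =====
-- the 'for idx, est in enumerate(...)' loop with its break, folding the dict through it
def aLoop (ub : Int) : List (Int × Int) → PySem.Dict Int Int → PySem.Dict Int Int
  | [], d => d
  | (idx, est) :: rest, d =>
    if est < ub then aLoop ub rest (d.insert est idx) else d

def gen_guess_crack (estimations : List Int) (upper_bound : Int) : List Int × List Int :=
  let s := PySem.List.sorted estimations (fun x => x)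
  let gc_pairs := aLoop upper_bound (PySem.List.enumerate s) PySem.Dict.empty
  (gc_pairs.keys, gc_pairs.values)

-- ===== PORT B =====
-- Source B's inlined bisect_right while-loop ('mid' is substituted at its three uses); lo/hi start at 0
-- and len and stay ≥ 0 in Python, so they are kept as Nat and '//2' is Nat division, exact here;
-- estimations[mid] is always in range (lo ≤ mid < hi ≤ len), ported as getD with an unreachable default
def bLoop (s : List Int) (v : Int) (lo hi : Nat) : Nat :=
  if lo < hi then
    if s.getD ((lo + hi) / 2) 0 ≤ v then bLoop s v ((lo + hi) / 2 + 1) hi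
    else bLoop s v lo ((lo + hi) / 2)
  else lo
termination_by hi - lo
decreasing_by all_goals omega

def gen_guess_crack_alt (estimations : List Int) (upper_bound : Int) : List Int × List Int :=
  let s := PySem.List.sorted estimations (fun x => x)
  let vals := PySem.List.sorted
    (PySem.Set.ofList (s.filter (fun e => e < upper_bound))) (fun x => x)
  let idxs := vals.map (fun v => (bLoop s v 0 s.length : Int) - 1)
  (vals, idxs)

-- ===== PRECONDITION & SPEC =====
def Spec_gen_guess_crack (estimations : List Int) (upper_bound : Int) (out : List Int × List Int) : Prop := out = gen_guess_crack_alt estimations upper_bound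
instance (estimations : List Int) (upper_bound : Int) (out : List Int × List Int) : Decidable (Spec_gen_guess_crack estimations upper_bound out) := by unfold Spec_gen_guess_crack; infer_instance

-- ===== CLAIM (what is proved, stated in full; the proofs are below) =====
def Claim_equal_gen_guess_crack : Prop := ∀ (estimations : List Int) (upper_bound : Int), Dom_gen_guess_crack estimations upper_bound → Spec_gen_guess_crack estimations upper_bound (gen_guess_crack estimations upper_bound)

-- ===== LEMMAS AND PROOFS =====

-- adjacent dedup: on a sorted list, the distinct values in order
def dedupAdj : List Int → List Int
  | [] => []
  | [a] => [a]
  | a :: b :: l => if a = b then dedupAdj (b :: l) else a :: dedupAdj (b :: l)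

theorem mem_dedupAdj (l : List Int) (x : Int) : x ∈ dedupAdj l ↔ x ∈ l := by
  induction l using dedupAdj.induct with
  | case1 => simp [dedupAdj]
  | case2 a => simp [dedupAdj]
  | case3 b l ih => simp only [dedupAdj, if_true]; rw [ih]; simp
  | case4 a b l hab ih => simp [dedupAdj, hab, ih]

theorem pairwise_lt_dedupAdj (l : List Int) (h : l.Pairwise (· ≤ ·)) :
    (dedupAdj l).Pairwise (· < ·) := by
  induction l using dedupAdj.induct with
  | case1 => simp [dedupAdj]
  | case2 a => simp [dedupAdj]
  | case3 b l ih => simp only [dedupAdj, if_true]; exact ih h.tail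
  | case4 a b l hab ih =>
      simp only [dedupAdj, if_neg hab]
      refine List.Pairwise.cons ?_ (ih h.tail)
      intro y hy
      have hy' : y ∈ b :: l := (mem_dedupAdj _ _).mp hy
      refine lt_of_lt_of_le
        (lt_of_le_of_ne (List.rel_of_pairwise_cons h (List.mem_cons_self ..)) hab) ?_
      rcases List.mem_cons.mp hy' with rfl | hy2
      · exact le_refl _
      · exact List.rel_of_pairwise_cons h.tail hy2

theorem filter_eq_takeWhile_sorted (ub : Int) (s : List Int) (hs : s.Pairwise (· ≤ ·)) :
    s.filter (fun e => decide (e < ub)) = s.takeWhile (fun e => decide (e < ub)) := by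
  induction s with
  | nil => rfl
  | cons a t ih =>
    by_cases ha : a < ub
    · simp [ha, ih hs.tail]
    · rw [List.takeWhile_cons_of_neg (by simp [ha]), List.filter_eq_nil_iff.mpr ?_]
      intro x hx
      simp only [decide_eq_true_eq]
      rcases List.mem_cons.mp hx with rfl | hx'
      · exact ha
      · exact fun h => ha (lt_of_le_of_lt (List.rel_of_pairwise_cons hs hx') h)

theorem insert_split (base extra : List (Int × Int)) (k : Int) (v : Int)
    (hb : ∀ q ∈ base, q.1 ≠ k) :
    (PySem.Dict.mk (base ++ extra)).insert k v
      = PySem.Dict.mk (base ++ ((PySem.Dict.mk extra).insert k v).items) := by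
  have hbase : base.any (fun p => p.1 == k) = false := by
    simp only [List.any_eq_false]
    intro p hp; simpa using hb p hp
  have hmap : List.map (fun p => if p.1 = k then (k, v) else p) base = base := by
    conv_rhs => rw [← List.map_id base]
    exact List.map_congr_left (fun p hp => by simp [hb p hp])
  by_cases hc : extra.any (fun p => p.1 == k) = true
  · simp [PySem.Dict.insert, PySem.Dict.contains_mk, List.any_append, hbase, hc,
      List.map_append, hmap]
  · simp only [Bool.not_eq_true] at hc
    simp [PySem.Dict.insert, PySem.Dict.contains_mk, List.any_append, hbase, hc]

theorem aLoop_split (ub : Int) (pairs : List (Int × Int)) :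
    ∀ (base extra : List (Int × Int)),
    (∀ pr ∈ pairs, ∀ q ∈ base, q.1 ≠ pr.2) →
    (aLoop ub pairs (PySem.Dict.mk (base ++ extra))).items
      = base ++ (aLoop ub pairs (PySem.Dict.mk extra)).items := by
  induction pairs with
  | nil => intro base extra h; simp [aLoop]
  | cons pr rest ih =>
    intro base extra h
    obtain ⟨idx, est⟩ := pr
    by_cases he : est < ub
    · simp only [aLoop, if_pos he]
      rw [insert_split base extra est idx (fun q hq => h (idx, est) (List.mem_cons_self ..) q hq)]
      exact ih base _ (fun p hp q hq => h p (List.mem_cons_of_mem _ hp) q hq)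
    · simp [aLoop, he]

theorem countP_gt_of_getElem_le (s : List Int) (v : Int) (hs : s.Pairwise (· ≤ ·))
    (i : Nat) (hi : i < s.length) (h : s[i] ≤ v) :
    i < s.countP (fun x => decide (x ≤ v)) := by
  have hsplit := List.countP_append (l₁ := s.take (i+1)) (l₂ := s.drop (i+1))
      (p := fun x => decide (x ≤ v))
  rw [List.take_append_drop] at hsplit
  have hall : s.countP (fun x => decide (x ≤ v)) ≥ (s.take (i+1)).length := by
    rw [hsplit]
    have : (s.take (i+1)).countP (fun x => decide (x ≤ v)) = (s.take (i+1)).length := by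
      rw [List.countP_eq_length]
      intro a ha
      obtain ⟨j, hj, rfl⟩ := List.mem_iff_getElem.mp ha
      rw [List.getElem_take]
      have hj' : j < i + 1 := by
        have := hj; simp [List.length_take] at this; omega
      have hji : s[j] ≤ s[i] := by
        rcases Nat.lt_or_ge j i with hlt | hge
        · exact (List.pairwise_iff_getElem.mp hs) j i (by omega) hi hlt
        · have : j = i := by omega
          subst this; exact le_refl _
      simpa using le_trans hji h
    omega
  have : (s.take (i+1)).length = i + 1 := by simp [List.length_take]; omega
  omega

theorem countP_le_of_lt_getElem (s : List Int) (v : Int) (hs : s.Pairwise (· ≤ ·))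
    (i : Nat) (hi : i < s.length) (h : v < s[i]) :
    s.countP (fun x => decide (x ≤ v)) ≤ i := by
  have hsplit := List.countP_append (l₁ := s.take i) (l₂ := s.drop i)
      (p := fun x => decide (x ≤ v))
  rw [List.take_append_drop] at hsplit
  have hzero : (s.drop i).countP (fun x => decide (x ≤ v)) = 0 := by
    rw [List.countP_eq_zero]
    intro a ha
    obtain ⟨j, hj, rfl⟩ := List.mem_iff_getElem.mp ha
    have hj2 : i + j < s.length := by simp at hj; omega
    rw [List.getElem_drop]
    have hij : s[i] ≤ s[i + j] := by
      rcases Nat.eq_or_lt_of_le (Nat.le_add_right i j) with heq | hlt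
      · simp [← heq]
      · exact (List.pairwise_iff_getElem.mp hs) i (i + j) hi (by simp at hj; omega) hlt
    simp; omega
  have h1 : (s.take i).length = min i s.length := List.length_take
  have hle : (s.take i).countP (fun x => decide (x ≤ v)) ≤ (s.take i).length :=
    List.countP_le_length
  omega

theorem bLoop_eq (s : List Int) (v : Int) (hs : s.Pairwise (· ≤ ·)) :
    ∀ n lo hi, hi - lo = n → lo ≤ s.countP (fun x => decide (x ≤ v)) →
      s.countP (fun x => decide (x ≤ v)) ≤ hi → hi ≤ s.length →
      bLoop s v lo hi = s.countP (fun x => decide (x ≤ v)) := by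
  intro n
  induction n using Nat.strong_induction_on with
  | _ n ih =>
    intro lo hi hn hlo hhi hlen
    rw [bLoop]
    by_cases hlt : lo < hi
    · rw [if_pos hlt]
      have hmidlt : (lo + hi) / 2 < hi := by omega
      have hmidge : lo ≤ (lo + hi) / 2 := by omega
      have hmem : (lo + hi) / 2 < s.length := by omega
      rw [List.getD_eq_getElem s 0 hmem]
      by_cases hc : s[(lo + hi) / 2] ≤ v
      · rw [if_pos hc]
        have := countP_gt_of_getElem_le s v hs _ hmem hc
        exact ih (hi - ((lo + hi) / 2 + 1)) (by omega) _ _ rfl (by omega) hhi hlen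
      · rw [if_neg hc]
        have := countP_le_of_lt_getElem s v hs _ hmem (by omega)
        exact ih ((lo + hi) / 2 - lo) (by omega) _ _ rfl hlo (by omega) (by omega)
    · rw [if_neg hlt]; omega

theorem aLoop_char (ub : Int) : ∀ (s : List Int), s.Pairwise (· ≤ ·) → ∀ i0 : Int,
    (aLoop ub (PySem.List.enumerate s i0) PySem.Dict.empty).items
      = (dedupAdj (s.takeWhile (fun e => decide (e < ub)))).map
          (fun v => (v, i0 + (s.countP (fun x => decide (x ≤ v)) : Int) - 1)) := by
  intro s
  induction s using dedupAdj.induct with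
  | case1 => intro _ i0; simp [PySem.List.enumerate_nil, aLoop, dedupAdj, PySem.Dict.empty]
  | case2 a =>
    intro _ i0
    by_cases ha : a < ub
    · simp [PySem.List.enumerate_cons, PySem.List.enumerate_nil, aLoop, ha, dedupAdj,
        PySem.Dict.empty, PySem.Dict.insert, PySem.Dict.contains_mk, List.countP_cons]
    · simp [PySem.List.enumerate_cons, PySem.List.enumerate_nil, aLoop, ha, dedupAdj,
        PySem.Dict.empty]
  | case3 b l ih =>
    intro h i0
    by_cases hb : b < ub
    · have step : aLoop ub (PySem.List.enumerate (b :: b :: l) i0) PySem.Dict.empty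
          = aLoop ub (PySem.List.enumerate (b :: l) (i0 + 1)) PySem.Dict.empty := by
        simp only [PySem.List.enumerate_cons, aLoop, if_pos hb,
          PySem.Dict.insert_insert_self]
      rw [step, ih h.tail (i0 + 1)]
      have htw : (b :: b :: l).takeWhile (fun e => decide (e < ub))
          = b :: ((b :: l).takeWhile (fun e => decide (e < ub))) := by
        rw [List.takeWhile_cons_of_pos (by simpa using hb)]
      have htw2 : (b :: l).takeWhile (fun e => decide (e < ub))
          = b :: (l.takeWhile (fun e => decide (e < ub))) := by
        rw [List.takeWhile_cons_of_pos (by simpa using hb)]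
      rw [htw, htw2]
      have hded : dedupAdj (b :: b :: l.takeWhile (fun e => decide (e < ub)))
          = dedupAdj (b :: l.takeWhile (fun e => decide (e < ub))) := by
        simp [dedupAdj]
      rw [hded, ← htw2]
      apply List.map_congr_left
      intro v hv
      have hvmem : v ∈ b :: l := (List.takeWhile_sublist _).subset ((mem_dedupAdj _ _).mp hv)
      have hbv : b ≤ v := by
        rcases List.mem_cons.mp hvmem with rfl | hv2
        · exact le_refl _
        · exact List.rel_of_pairwise_cons h.tail hv2
      have hc : (b :: b :: l).countP (fun x => decide (x ≤ v))
          = 1 + (b :: l).countP (fun x => decide (x ≤ v)) := by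
        rw [List.countP_cons]
        simp [hbv]; omega
      rw [hc]
      simp; ring
    · rw [PySem.List.enumerate_cons]
      simp only [aLoop, if_neg hb]
      rw [List.takeWhile_cons_of_neg (by simpa using hb)]
      simp [dedupAdj, PySem.Dict.empty]
  | case4 a b l hab ih =>
    intro h i0
    by_cases ha : a < ub
    · have hblel : ∀ x ∈ b :: l, b ≤ x := by
        intro x hx
        rcases List.mem_cons.mp hx with rfl | hx2
        · exact le_refl _
        · exact List.rel_of_pairwise_cons h.tail hx2
      have haltb : a < b := lt_of_le_of_ne (List.rel_of_pairwise_cons h (List.mem_cons_self ..)) hab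
      rw [PySem.List.enumerate_cons]
      simp only [aLoop, if_pos ha]
      have hins : (PySem.Dict.empty : PySem.Dict Int Int).insert a i0
          = PySem.Dict.mk ([(a, i0)] ++ []) := by
        simp [PySem.Dict.empty, PySem.Dict.insert, PySem.Dict.contains_mk]
      rw [hins, aLoop_split ub _ [(a, i0)] []
        (by
          intro pr hpr q hq
          rw [PySem.List.mem_enumerate_iff] at hpr
          obtain ⟨k, hk, rfl⟩ := hpr
          have : (b :: l)[k] ∈ b :: l := List.getElem_mem hk
          have hble := hblel _ this
          simp only [List.mem_singleton] at hq
          subst hq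
          simp only []
          intro hEq
          rw [hEq] at haltb
          omega)]
      rw [show PySem.Dict.mk ([] : List (Int × Int)) = (PySem.Dict.empty : PySem.Dict Int Int) from rfl,
        ih h.tail (i0 + 1)]
      -- RHS
      rw [show List.takeWhile (fun e => decide (e < ub)) (a :: b :: l)
            = a :: List.takeWhile (fun e => decide (e < ub)) (b :: l)
          from List.takeWhile_cons_of_pos (by simpa using ha)]
      have hded : dedupAdj (a :: (b :: l).takeWhile (fun e => decide (e < ub)))
          = a :: dedupAdj ((b :: l).takeWhile (fun e => decide (e < ub))) := by
        rw [List.takeWhile_cons]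
        by_cases hb : b < ub
        · simp only [hb, decide_true, if_true]
          simp [dedupAdj, hab]
        · simp only [hb, decide_false]
          simp [dedupAdj]
      rw [hded]
      rw [List.map_cons]
      have hc0 : (b :: l).countP (fun x => decide (x ≤ a)) = 0 := by
        rw [List.countP_eq_zero]
        intro x hx
        have := hblel x hx
        simp; omega
      have hc1 : (a :: b :: l).countP (fun x => decide (x ≤ a)) = 1 := by
        rw [List.countP_cons, hc0]; simp
      rw [hc1, List.singleton_append]
      have hhead : ((a : Int), i0 + ((1 : Nat) : Int) - 1) = (a, i0) := by norm_num
      rw [hhead]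
      refine congrArg (List.cons _) ?_
      apply List.map_congr_left
      intro v hv
      have hvmem : v ∈ b :: l := (List.takeWhile_sublist _).subset ((mem_dedupAdj _ _).mp hv)
      have hav : a ≤ v := le_trans (le_of_lt haltb) (hblel v hvmem)
      have hcnt : List.countP (fun x => decide (x ≤ v)) (a :: b :: l)
          = List.countP (fun x => decide (x ≤ v)) (b :: l) + 1 := by
        rw [List.countP_cons]; simp [hav]
      rw [hcnt]
      simp only [Prod.mk.injEq, true_and]
      push_cast
      ring
    · rw [PySem.List.enumerate_cons]
      simp only [aLoop, if_neg ha]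
      rw [List.takeWhile_cons_of_neg (by simpa using ha)]
      simp [dedupAdj, PySem.Dict.empty]
-- ===== VERDICT (by name: the statement is the Claim_ definition above) =====
theorem gen_guess_crack_spec : Claim_equal_gen_guess_crack := by
  intro est ub _
  unfold Spec_gen_guess_crack gen_guess_crack gen_guess_crack_alt
  dsimp only
  have hs : (PySem.List.sorted est (fun x => x)).Pairwise (· ≤ ·) :=
    PySem.List.sorted_pairwise est (fun x => x)
  set s := PySem.List.sorted est (fun x => x) with hsdef
  set tw := s.takeWhile (fun e => decide (e < ub)) with htwdef
  have htws : tw.Pairwise (· ≤ ·) := hs.sublist (List.takeWhile_sublist _)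
  have hvals : PySem.List.sorted (PySem.Set.ofList tw) (fun x => x) = dedupAdj tw := by
    apply PySem.List.sorted_eq_of_perm_of_pairwise_lt
    · refine (List.perm_ext_iff_of_nodup ?_ (PySem.Set.nodup_ofList tw)).mpr ?_
      · exact (pairwise_lt_dedupAdj tw htws).imp (fun h => ne_of_lt h)
      · intro a
        rw [mem_dedupAdj, PySem.Set.mem_ofList]
    · exact pairwise_lt_dedupAdj tw htws
  have hbl : ∀ v : Int, bLoop s v 0 s.length = s.countP (fun x => decide (x ≤ v)) :=
    fun v => bLoop_eq s v hs s.length 0 s.length (by omega) (Nat.zero_le _)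
      List.countP_le_length le_rfl
  rw [filter_eq_takeWhile_sorted ub s hs, hvals]
  simp only [PySem.Dict.keys, PySem.Dict.values, aLoop_char ub s hs 0, List.map_map,
    Prod.mk.injEq]
  refine ⟨?_, ?_⟩
  · conv_rhs => rw [← List.map_id (dedupAdj tw)]
    exact List.map_congr_left (fun v _ => rfl)
  · apply List.map_congr_left
    intro v _
    simp [Function.comp, hbl v]
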